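-- pv_equiv track=rewrite | github.com/Ortiz-Ascencio-Alvaro-Martin/IA_3_23110160 | 001_Metodos_de_Ordenamientos/002_Metodo_Externo/003_Balanced_MM.py | multiway_merge
-- ===== SOURCE A (Python) =====
-- def multiway_merge(input_devices):
--     """
--     Realiza la mezcla de múltiples secuencias (K-way merge).
--     input_devices es una lista de listas de runs (los dispositivos de lectura).
--     """
--     import heapq
--
--     # Inicializa el heap de prioridad (min-heap)
--     # Almacenará tuplas: (valor, índice_run, índice_dispositivo)
--     heap = []
--
--     # Simplificación: Combina todas las runs de todos los dispositivos de entrada en un solo pool para la mezcla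
--     all_runs = []
--     for device_runs in input_devices:
--         all_runs.extend(device_runs)
--
--     # Inicializa índices para cada run
--     run_indices = [0] * len(all_runs)
--
--     # Introduce el primer elemento de cada run al heap
--     for i, run in enumerate(all_runs):
--         if run:
--             heapq.heappush(heap, (run[0], i)) # (valor, índice_run)
--
--     final_merged_run = []
--
--     while heap:
--         # Extrae el elemento más pequeño del heap
--         value, run_index = heapq.heappop(heap)
--         final_merged_run.append(value)
--
--         # Mueve el puntero de esa run al siguiente elemento
--         run_indices[run_index] += 1
--
--         # Si la run aún tiene elementos, agrega el siguiente al heap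
--         next_index = run_indices[run_index]
--         if next_index < len(all_runs[run_index]):
--             next_value = all_runs[run_index][next_index]
--             heapq.heappush(heap, (next_value, run_index))
--
--     return [final_merged_run] # Devuelve una única run grande (el resultado de la pasada)
-- ===== SOURCE B (Python) =====
-- def multiway_merge(input_devices):
--     """Selection-based k-way merge: keep the list of remaining run suffixes and
--     repeatedly pop the smallest head (first run on ties); no heap, no pointer array."""
--     tails = [run for device in input_devices for run in device if run]
--     merged = []
--     while tails:
--         j = min(range(len(tails)), key=lambda i: tails[i][0])
--         merged.append(tails[j][0])
--         rest = tails[j][1:]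
--         tails = tails[:j] + ([rest] if rest else []) + tails[j+1:]
--     return [merged]
-- ===== Notes on version B (the rewrite author's own statement) =====
-- stated objective: alternative
-- what changed: B replaces A's heap (with a pointer array over the pooled runs) by a selection merge: it keeps the list of remaining run suffixes and repeatedly pops the smallest head (first run on ties), so the heap, the pointer array and heapq disappear.
import Mathlib
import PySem

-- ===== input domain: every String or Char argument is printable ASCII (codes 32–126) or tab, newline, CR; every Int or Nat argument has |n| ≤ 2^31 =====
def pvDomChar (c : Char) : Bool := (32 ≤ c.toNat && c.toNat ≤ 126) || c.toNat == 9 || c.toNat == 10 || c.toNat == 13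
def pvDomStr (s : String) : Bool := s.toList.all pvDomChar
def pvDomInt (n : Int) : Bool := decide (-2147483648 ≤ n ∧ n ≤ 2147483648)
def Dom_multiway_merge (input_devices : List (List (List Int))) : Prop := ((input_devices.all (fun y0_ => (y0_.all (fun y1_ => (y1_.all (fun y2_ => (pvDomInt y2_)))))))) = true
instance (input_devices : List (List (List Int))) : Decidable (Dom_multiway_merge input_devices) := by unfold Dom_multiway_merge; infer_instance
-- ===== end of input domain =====

-- B replaces A's heap-with-pointer-array k-way merge by a selection merge over the list of
-- remaining run suffixes (repeatedly pop the smallest head, first run on ties): alternative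
-- algorithm of the same result; neither version mutates its argument.

-- ===== PORT A =====
-- A's run indices are produced by enumerate, hence nonnegative: the ports carry them as Nat.
-- heapq on tuples with pairwise-distinct second components is modeled by its contract: the
-- heap is a list kept sorted by the tuple order; heappush = ordered insert, heappop = head.
def mmLexLe (a b : Int × Nat) : Bool := decide (a.1 < b.1 ∨ (a.1 = b.1 ∧ a.2 ≤ b.2))

def mmPush (x : Int × Nat) : List (Int × Nat) → List (Int × Nat)
  | [] => [x]
  | y :: ys => if mmLexLe x y then x :: y :: ys else y :: mmPush x ys

-- the while loop; it runs exactly once per merged element, so the caller's fuel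
-- (total number of elements) makes it total without changing its behaviour
def mmLoopA (runs : List (List Int)) : Nat → List (Int × Nat) → List Nat → List Int → List Int
  | 0, _, _, acc => acc
  | _ + 1, [], _, acc => acc
  | fuel + 1, (v, i) :: hp, ptrs, acc =>
    let p := ptrs.getD i 0 + 1
    let ptrs' := ptrs.set i p
    let run := runs.getD i []
    let hp' := if p < run.length then mmPush (run.getD p 0, i) hp else hp
    mmLoopA runs fuel hp' ptrs' (acc ++ [v])

def multiway_merge (input_devices : List (List (List Int))) : List (List Int) :=
  let all_runs := input_devices.foldl (fun acc d => acc ++ d) []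
  let run_indices := List.replicate all_runs.length 0
  let heap := all_runs.zipIdx.foldl
    (fun h pr => if pr.1.isEmpty then h else mmPush (pr.1.headD 0, pr.2) h) []
  [mmLoopA all_runs ((all_runs.map List.length).sum) heap run_indices []]

-- ===== PORT B =====
-- min(range(len(tails)), key=lambda i: tails[i][0]) : Python's min keeps the first minimum
def mmPick (tails : List (List Int)) : Nat :=
  (List.range tails.length).foldl
    (fun b i => if (tails.getD i []).headD 0 < (tails.getD b []).headD 0 then i else b) 0

-- the picked index stays in range (needed for termination of the loop below)
lemma mmChoice (tails : List (List Int)) (l : List Nat) :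
    ∀ b : Nat,
      l.foldl (fun b i => if (tails.getD i []).headD 0 < (tails.getD b []).headD 0 then i else b) b = b ∨
      l.foldl (fun b i => if (tails.getD i []).headD 0 < (tails.getD b []).headD 0 then i else b) b ∈ l := by
  induction l with
  | nil => intro b; left; rfl
  | cons i l ih =>
    intro b
    simp only [List.foldl_cons]
    rcases ih (if (tails.getD i []).headD 0 < (tails.getD b []).headD 0 then i else b) with h | h
    · rw [h]
      split
      · right; simp
      · left; rfl
    · right; exact List.mem_cons_of_mem _ h

lemma mmPick_lt_length (tails : List (List Int)) (h : tails ≠ []) : mmPick tails < tails.length := by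
  have h0 : 0 < tails.length := List.length_pos_of_ne_nil h
  rcases mmChoice tails (List.range tails.length) 0 with h1 | h1
  · unfold mmPick; rw [h1]; exact h0
  · exact List.mem_range.1 h1

def mmLoopB : List (List Int) → List Int → List Int
  | [], acc => acc
  | t0 :: ts, acc =>
    mmLoopB
      ((t0 :: ts).take (mmPick (t0 :: ts)) ++
        (if ((t0 :: ts).getD (mmPick (t0 :: ts)) []).tail.isEmpty then []
         else [((t0 :: ts).getD (mmPick (t0 :: ts)) []).tail]) ++
        (t0 :: ts).drop (mmPick (t0 :: ts) + 1))
      (acc ++ [((t0 :: ts).getD (mmPick (t0 :: ts)) []).headD 0])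
  termination_by tails _ => (tails.map (fun r => r.length + 1)).sum
  decreasing_by
    have hj : mmPick (t0 :: ts) < (t0 :: ts).length := mmPick_lt_length _ (by simp)
    have hget : (t0 :: ts).getD (mmPick (t0 :: ts)) [] = (t0 :: ts)[mmPick (t0 :: ts)] :=
      List.getD_eq_getElem _ _ hj
    have hdec : (t0 :: ts) =
        (t0 :: ts).take (mmPick (t0 :: ts)) ++ (t0 :: ts)[mmPick (t0 :: ts)] :: (t0 :: ts).drop (mmPick (t0 :: ts) + 1) := by
      conv_lhs => rw [← List.take_append_drop (mmPick (t0 :: ts)) (t0 :: ts)]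
      rw [List.drop_eq_getElem_cons hj]
    conv_rhs => rw [hdec]
    rw [hget]
    simp only [List.map_append, List.sum_append, List.map_cons, List.sum_cons]
    split
    · rename_i hemp
      simp only [List.map_nil, List.sum_nil]
      omega
    · rename_i hemp
      have hne : (t0 :: ts)[mmPick (t0 :: ts)] ≠ [] := by
        intro h'; rw [h'] at hemp; simp at hemp
      have : (t0 :: ts)[mmPick (t0 :: ts)].tail.length + 1 ≤ (t0 :: ts)[mmPick (t0 :: ts)].length := by
        rw [List.length_tail]
        have := List.length_pos_of_ne_nil hne
        omega
      simp only [List.map_cons, List.map_nil, List.sum_cons, List.sum_nil]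
      omega

def multiway_merge_alt (input_devices : List (List (List Int))) : List (List Int) :=
  [mmLoopB ((input_devices.flatMap id).filter (fun r => !r.isEmpty)) []]

-- ===== PRECONDITION & SPEC =====
def Spec_multiway_merge (input_devices : List (List (List Int))) (out : List (List Int)) : Prop := out = multiway_merge_alt input_devices
instance (input_devices : List (List (List Int))) (out : List (List Int)) : Decidable (Spec_multiway_merge input_devices out) := by unfold Spec_multiway_merge; infer_instance

-- ===== CLAIM (what is proved, stated in full; the proofs are below) =====
def Claim_equal_multiway_merge : Prop := ∀ (input_devices : List (List (List Int))), Dom_multiway_merge input_devices → Spec_multiway_merge input_devices (multiway_merge input_devices)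

-- ===== LEMMAS AND PROOFS =====

-- abstract view of the state shared by both loops
def mmVal (runs : List (List Int)) (ptrs : List Nat) (i : Nat) : Int :=
  (runs.getD i []).getD (ptrs.getD i 0) 0

def mmPairs (runs : List (List Int)) (ptrs : List Nat) (is : List Nat) : List (Int × Nat) :=
  is.map (fun i => (mmVal runs ptrs i, i))

def mmTails (runs : List (List Int)) (ptrs : List Nat) (is : List Nat) : List (List Int) :=
  is.map (fun i => (runs.getD i []).drop (ptrs.getD i 0))

def mmRem (runs : List (List Int)) (ptrs : List Nat) (is : List Nat) : Nat :=
  (is.map (fun i => (runs.getD i []).length - ptrs.getD i 0)).sum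

lemma mmHeadD_drop (l : List Int) (n : Nat) : ((l.drop n).headD 0) = l.getD n 0 := by
  induction l generalizing n with
  | nil => simp
  | cons a t ih =>
    cases n with
    | zero => simp
    | succ k => simpa using ih k

lemma mmPush_perm (x : Int × Nat) (l : List (Int × Nat)) : (mmPush x l).Perm (x :: l) := by
  induction l with
  | nil => simp [mmPush]
  | cons y ys ih =>
    simp only [mmPush]
    split
    · exact List.Perm.refl _
    · exact (ih.cons y).trans (List.Perm.swap x y ys)

lemma mmLexLe_total (a b : Int × Nat) (h : ¬ mmLexLe a b = true) : mmLexLe b a = true := by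
  simp [mmLexLe] at *; omega

lemma mmLexLe_trans (a b c : Int × Nat) (h1 : mmLexLe a b = true) (h2 : mmLexLe b c = true) :
    mmLexLe a c = true := by
  simp [mmLexLe] at *; omega

lemma mmPush_sorted (x : Int × Nat) (l : List (Int × Nat))
    (hs : List.Pairwise (fun a b => mmLexLe a b = true) l) :
    List.Pairwise (fun a b => mmLexLe a b = true) (mmPush x l) := by
  induction l with
  | nil => simp [mmPush]
  | cons y ys ih =>
    rcases List.pairwise_cons.1 hs with ⟨hy, hys⟩
    simp only [mmPush]
    split
    · rename_i hxy
      refine List.pairwise_cons.2 ⟨?_, hs⟩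
      intro z hz
      rcases List.mem_cons.1 hz with rfl | hz
      · exact hxy
      · exact mmLexLe_trans _ _ _ hxy (hy z hz)
    · rename_i hxy
      refine List.pairwise_cons.2 ⟨?_, ih hys⟩
      intro z hz
      rcases List.mem_cons.1 ((mmPush_perm x ys).mem_iff.1 hz) with rfl | hz
      · exact mmLexLe_total _ _ hxy
      · exact hy z hz

lemma mmStay (tails : List (List Int)) (l : List Nat) :
    ∀ b : Nat, (∀ i ∈ l, ¬ ((tails.getD i []).headD 0 < (tails.getD b []).headD 0)) →
      l.foldl (fun b i => if (tails.getD i []).headD 0 < (tails.getD b []).headD 0 then i else b) b = b := by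
  induction l with
  | nil => intro b _; rfl
  | cons i l ih =>
    intro b h
    simp only [List.foldl_cons]
    rw [if_neg (h i (by simp))]
    exact ih b (fun j hj => h j (List.mem_cons_of_mem _ hj))

lemma mmPick_spec (tails : List (List Int)) (j : Nat) (hj : j < tails.length)
    (hmin : ∀ m, m < tails.length → (tails.getD j []).headD 0 ≤ (tails.getD m []).headD 0)
    (hfirst : ∀ m, m < j → (tails.getD j []).headD 0 < (tails.getD m []).headD 0) :
    mmPick tails = j := by
  unfold mmPick
  have hsplit : tails.length = (j + 1) + (tails.length - (j + 1)) := by omega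
  rw [hsplit, List.range_add, List.foldl_append]
  have h1 : (List.range (j + 1)).foldl
      (fun b i => if (tails.getD i []).headD 0 < (tails.getD b []).headD 0 then i else b) 0 = j := by
    rw [List.range_succ, List.foldl_append]
    rcases mmChoice tails (List.range j) 0 with h | h
    · rw [h]
      simp only [List.foldl_cons, List.foldl_nil]
      rcases Nat.eq_zero_or_pos j with hj0 | hj0
      · subst hj0; rw [if_neg (lt_irrefl _)]
      · rw [if_pos (hfirst 0 hj0)]
    · have hb := List.mem_range.1 h
      simp only [List.foldl_cons, List.foldl_nil]
      rw [if_pos (hfirst _ hb)]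
  rw [h1]
  apply mmStay
  intro i hi
  obtain ⟨m, hm, rfl⟩ := List.mem_map.1 hi
  have hmlt : j + 1 + m < tails.length := by have := List.mem_range.1 hm; omega
  exact not_lt.2 (hmin _ hmlt)

-- the bisimulation: one A-iteration corresponds to one B-iteration
lemma mmMain (runs : List (List Int)) :
    ∀ (fuel : Nat) (heap : List (Int × Nat)) (ptrs : List Nat) (is : List Nat) (acc : List Int),
      ptrs.length = runs.length →
      List.Pairwise (· < ·) is →
      (∀ i ∈ is, i < runs.length ∧ ptrs.getD i 0 < (runs.getD i []).length) →
      List.Pairwise (fun a b => mmLexLe a b = true) heap →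
      heap.Perm (mmPairs runs ptrs is) →
      mmRem runs ptrs is ≤ fuel →
      mmLoopA runs fuel heap ptrs acc = mmLoopB (mmTails runs ptrs is) acc := by
  intro fuel
  induction fuel with
  | zero =>
    intro heap ptrs is acc hlen hsort hbound hhs hperm hrem
    have his : is = [] := by
      cases is with
      | nil => rfl
      | cons i it =>
        exfalso
        have h1 := (hbound i (by simp)).2
        have h2 : 1 ≤ mmRem runs ptrs (i :: it) := by
          simp only [mmRem, List.map_cons, List.sum_cons]
          omega
        omega
    subst his
    simp [mmLoopA, mmTails, mmLoopB]
  | succ fuel ih =>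
    intro heap ptrs is acc hlen hsort hbound hhs hperm hrem
    cases heap with
    | nil =>
      have hp0 : mmPairs runs ptrs is = [] := hperm.symm.eq_nil
      have his : is = [] := by simpa [mmPairs] using hp0
      subst his
      simp [mmLoopA, mmTails, mmLoopB]
    | cons x hp =>
      obtain ⟨v, i₀⟩ := x
      -- the popped pair is the lexicographic minimum of the current (head, run) pairs
      have hx : (v, i₀) ∈ mmPairs runs ptrs is := hperm.subset (by simp)
      have hi₀v : i₀ ∈ is ∧ mmVal runs ptrs i₀ = v := by
        obtain ⟨i1, hi1, hie⟩ := List.mem_map.1 hx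
        simp only [Prod.mk.injEq] at hie
        obtain ⟨h1, h2⟩ := hie
        subst h2
        exact ⟨hi1, h1⟩
      obtain ⟨hi₀, hv⟩ := hi₀v
      have hj₀ : is.idxOf i₀ < is.length := List.idxOf_lt_length_of_mem hi₀
      have hgj₀ : is[is.idxOf i₀] = i₀ := List.getElem_idxOf hj₀
      have hisdec : is = is.take (is.idxOf i₀) ++ i₀ :: is.drop (is.idxOf i₀ + 1) := by
        conv_lhs => rw [← List.take_append_drop (is.idxOf i₀) is]
        rw [List.drop_eq_getElem_cons hj₀, hgj₀]
      set j₀ := is.idxOf i₀ with hj₀def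
      set L := is.take j₀ with hLdef
      set R := is.drop (j₀ + 1) with hRdef
      have hLlen : L.length = j₀ := by rw [hLdef]; simp; omega
      have hsort' : List.Pairwise (· < ·) (L ++ i₀ :: R) := hisdec ▸ hsort
      rw [List.pairwise_append] at hsort'
      obtain ⟨hPL, hPiR, hcross⟩ := hsort'
      obtain ⟨hiR, hPR⟩ := List.pairwise_cons.1 hPiR
      have hcrossL : ∀ a ∈ L, a < i₀ := fun a ha => hcross a ha i₀ (by simp)
      have hi₀L : i₀ ∉ L := fun h => lt_irrefl _ (hcrossL _ h)
      have hi₀R : i₀ ∉ R := fun h => lt_irrefl _ (hiR _ h)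
      have hmemL : ∀ j ∈ L, j ∈ is := by intro j hj; rw [hisdec]; exact List.mem_append_left _ hj
      have hmemR : ∀ j ∈ R, j ∈ is := by
        intro j hj; rw [hisdec]; exact List.mem_append_right _ (List.mem_cons_of_mem _ hj)
      obtain ⟨hhead, hhs'⟩ := List.pairwise_cons.1 hhs
      have hminall : ∀ i ∈ is, v ≤ mmVal runs ptrs i := by
        intro i hi
        have hmem : (mmVal runs ptrs i, i) ∈ (v, i₀) :: hp := by
          refine hperm.symm.subset ?_
          simp only [mmPairs, List.mem_map]
          exact ⟨i, hi, rfl⟩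
        rcases List.mem_cons.1 hmem with he | hm
        · simp only [Prod.mk.injEq] at he
          rw [he.1]
        · have := hhead _ hm
          simp only [mmLexLe, decide_eq_true_eq] at this
          rcases this with h | h
          · exact le_of_lt h
          · exact le_of_eq h.1
      have hvfirst : ∀ (m : Nat) (hm : m < is.length), m < j₀ → v < mmVal runs ptrs is[m] := by
        intro m hm hmj
        have hlt : is[m] < i₀ := by
          have := List.pairwise_iff_getElem.1 hsort m j₀ hm hj₀ hmj
          rwa [hgj₀] at this
        have hmem : (mmVal runs ptrs is[m], is[m]) ∈ (v, i₀) :: hp := by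
          refine hperm.symm.subset ?_
          simp only [mmPairs, List.mem_map]
          exact ⟨is[m], List.getElem_mem hm, rfl⟩
        rcases List.mem_cons.1 hmem with he | hm'
        · simp only [Prod.mk.injEq] at he
          omega
        · have := hhead _ hm'
          simp only [mmLexLe, decide_eq_true_eq] at this
          rcases this with h | h
          · exact h
          · omega
      -- tails of the current state
      have hTlen : (mmTails runs ptrs is).length = is.length := by simp [mmTails]
      have hTget : ∀ (m : Nat) (hm : m < is.length),
          (mmTails runs ptrs is).getD m [] = (runs.getD is[m] []).drop (ptrs.getD is[m] 0) := by
        intro m hm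
        rw [List.getD_eq_getElem _ _ (by rw [hTlen]; exact hm)]
        simp [mmTails]
      have hThead : ∀ (m : Nat) (hm : m < is.length),
          ((mmTails runs ptrs is).getD m []).headD 0 = mmVal runs ptrs is[m] := by
        intro m hm
        rw [hTget m hm, mmHeadD_drop]
        rfl
      have hpick : mmPick (mmTails runs ptrs is) = j₀ := by
        apply mmPick_spec _ _ (by rw [hTlen]; exact hj₀)
        · intro m hm
          rw [hThead m (by rwa [hTlen] at hm), hThead j₀ hj₀, hgj₀, hv]
          exact hminall _ (List.getElem_mem _)
        · intro m hmj
          have hm : m < is.length := lt_trans hmj hj₀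
          rw [hThead m hm, hThead j₀ hj₀, hgj₀, hv]
          exact hvfirst m hm hmj
      have hi₀len : i₀ < runs.length := (hbound i₀ hi₀).1
      have hptlt : ptrs.getD i₀ 0 < (runs.getD i₀ []).length := (hbound i₀ hi₀).2
      have hi₀ptrs : i₀ < ptrs.length := by omega
      -- the updated pointer array
      have hset_i : (ptrs.set i₀ (ptrs.getD i₀ 0 + 1)).getD i₀ 0 = ptrs.getD i₀ 0 + 1 := by
        rw [List.getD_eq_getElem _ _ (by simpa using hi₀ptrs), List.getElem_set]
        simp
      have hset_ne : ∀ j, j ≠ i₀ → (ptrs.set i₀ (ptrs.getD i₀ 0 + 1)).getD j 0 = ptrs.getD j 0 := by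
        intro j hne
        by_cases hj : j < ptrs.length
        · rw [List.getD_eq_getElem _ _ (by simpa using hj), List.getElem_set,
            if_neg (fun h => hne h.symm), ← List.getD_eq_getElem]
        · have h1 : ptrs.getD j 0 = 0 := by
            rw [List.getD_eq_getElem?_getD, List.getElem?_eq_none (by omega : ptrs.length ≤ j)]
            rfl
          have h2 : (ptrs.set i₀ (ptrs.getD i₀ 0 + 1)).getD j 0 = 0 := by
            rw [List.getD_eq_getElem?_getD,
              List.getElem?_eq_none (by simp only [List.length_set]; omega)]
            rfl
          rw [h1, h2]
      have hneL : ∀ j ∈ L, j ≠ i₀ := fun j hj h => hi₀L (h ▸ hj)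
      have hneR : ∀ j ∈ R, j ≠ i₀ := fun j hj h => hi₀R (h ▸ hj)
      -- congruences: only the i₀ entry of the state changes
      have hTLN : mmTails runs (ptrs.set i₀ (ptrs.getD i₀ 0 + 1)) L = mmTails runs ptrs L := by
        unfold mmTails
        exact List.map_congr_left (fun j hj => by rw [hset_ne j (hneL j hj)])
      have hTRN : mmTails runs (ptrs.set i₀ (ptrs.getD i₀ 0 + 1)) R = mmTails runs ptrs R := by
        unfold mmTails
        exact List.map_congr_left (fun j hj => by rw [hset_ne j (hneR j hj)])
      have hPLN : mmPairs runs (ptrs.set i₀ (ptrs.getD i₀ 0 + 1)) L = mmPairs runs ptrs L := by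
        unfold mmPairs mmVal
        exact List.map_congr_left (fun j hj => by rw [hset_ne j (hneL j hj)])
      have hPRN : mmPairs runs (ptrs.set i₀ (ptrs.getD i₀ 0 + 1)) R = mmPairs runs ptrs R := by
        unfold mmPairs mmVal
        exact List.map_congr_left (fun j hj => by rw [hset_ne j (hneR j hj)])
      have hRLN : mmRem runs (ptrs.set i₀ (ptrs.getD i₀ 0 + 1)) L = mmRem runs ptrs L := by
        unfold mmRem
        exact congrArg List.sum (List.map_congr_left (fun j hj => by rw [hset_ne j (hneL j hj)]))
      have hRRN : mmRem runs (ptrs.set i₀ (ptrs.getD i₀ 0 + 1)) R = mmRem runs ptrs R := by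
        unfold mmRem
        exact congrArg List.sum (List.map_congr_left (fun j hj => by rw [hset_ne j (hneR j hj)]))
      -- decompositions of the state along is = L ++ i₀ :: R, for any pointer array
      have hTsplit : ∀ ptrs2 : List Nat, mmTails runs ptrs2 is =
          mmTails runs ptrs2 L ++ (runs.getD i₀ []).drop (ptrs2.getD i₀ 0) :: mmTails runs ptrs2 R := by
        intro ptrs2
        conv_lhs => rw [hisdec]
        simp [mmTails]
      have hPsplit : ∀ ptrs2 : List Nat, mmPairs runs ptrs2 is =
          mmPairs runs ptrs2 L ++ (mmVal runs ptrs2 i₀, i₀) :: mmPairs runs ptrs2 R := by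
        intro ptrs2
        conv_lhs => rw [hisdec]
        simp [mmPairs]
      have hRsplit : ∀ ptrs2 : List Nat, mmRem runs ptrs2 is =
          mmRem runs ptrs2 L + ((runs.getD i₀ []).length - ptrs2.getD i₀ 0) + mmRem runs ptrs2 R := by
        intro ptrs2
        conv_lhs => rw [hisdec]
        simp only [mmRem, List.map_append, List.map_cons, List.sum_append, List.sum_cons]
        omega
      have hTdec : mmTails runs ptrs is =
          mmTails runs ptrs L ++ (runs.getD i₀ []).drop (ptrs.getD i₀ 0) :: mmTails runs ptrs R :=
        hTsplit ptrs
      have hPdec : mmPairs runs ptrs is = mmPairs runs ptrs L ++ (v, i₀) :: mmPairs runs ptrs R := by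
        rw [hPsplit ptrs, hv]
      have hRdec : mmRem runs ptrs is =
          mmRem runs ptrs L + ((runs.getD i₀ []).length - ptrs.getD i₀ 0) + mmRem runs ptrs R :=
        hRsplit ptrs
      have hpperm : hp.Perm (mmPairs runs ptrs L ++ mmPairs runs ptrs R) := by
        have h1 : ((v, i₀) :: hp).Perm ((v, i₀) :: (mmPairs runs ptrs L ++ mmPairs runs ptrs R)) :=
          hperm.trans (hPdec ▸ List.perm_middle)
        exact h1.cons_inv
      have hTLlen : (mmTails runs ptrs L).length = j₀ := by simp [mmTails, hLlen]
      have htake : (mmTails runs ptrs is).take j₀ = mmTails runs ptrs L := by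
        rw [hTdec, ← hTLlen, List.take_left]
      have hdrop : (mmTails runs ptrs is).drop (j₀ + 1) = mmTails runs ptrs R := by
        rw [hTdec, show mmTails runs ptrs L ++ (runs.getD i₀ []).drop (ptrs.getD i₀ 0) :: mmTails runs ptrs R
            = (mmTails runs ptrs L ++ [(runs.getD i₀ []).drop (ptrs.getD i₀ 0)]) ++ mmTails runs ptrs R by simp]
        exact List.drop_left' (by simp [hTLlen])
      have hgetj₀ : (mmTails runs ptrs is).getD j₀ [] = (runs.getD i₀ []).drop (ptrs.getD i₀ 0) := by
        rw [hTget j₀ hj₀, hgj₀]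
      have hTne : mmTails runs ptrs is ≠ [] :=
        List.ne_nil_of_length_pos (by rw [hTlen]; omega)
      -- unfold one B-iteration
      obtain ⟨t0, ts, hT⟩ := List.exists_cons_of_ne_nil hTne
      rw [hT]
      simp only [mmLoopB]
      rw [← hT, hpick, hgetj₀, List.tail_drop, htake, hdrop, mmHeadD_drop,
        show (runs.getD i₀ []).getD (ptrs.getD i₀ 0) 0 = v from hv]
      -- unfold one A-iteration
      simp only [mmLoopA]
      by_cases hc : ptrs.getD i₀ 0 + 1 < (runs.getD i₀ []).length
      · -- run i₀ still has elements: it is re-inserted on both sides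
        rw [if_pos hc, if_neg (by
          simp only [List.isEmpty_iff, List.drop_eq_nil_iff]
          omega)]
        have hvalN : mmVal runs (ptrs.set i₀ (ptrs.getD i₀ 0 + 1)) i₀ =
            (runs.getD i₀ []).getD (ptrs.getD i₀ 0 + 1) 0 := by
          unfold mmVal
          rw [hset_i]
        have hTdecN : mmTails runs (ptrs.set i₀ (ptrs.getD i₀ 0 + 1)) is =
            mmTails runs ptrs L ++ (runs.getD i₀ []).drop (ptrs.getD i₀ 0 + 1) :: mmTails runs ptrs R := by
          rw [hTsplit _, hTLN, hTRN, hset_i]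
        have hPdecN : mmPairs runs (ptrs.set i₀ (ptrs.getD i₀ 0 + 1)) is =
            mmPairs runs ptrs L ++ ((runs.getD i₀ []).getD (ptrs.getD i₀ 0 + 1) 0, i₀) :: mmPairs runs ptrs R := by
          rw [hPsplit _, hPLN, hPRN, hvalN]
        have hRdecN : mmRem runs (ptrs.set i₀ (ptrs.getD i₀ 0 + 1)) is ≤ fuel := by
          have h1 := hRsplit (ptrs.set i₀ (ptrs.getD i₀ 0 + 1))
          rw [hRLN, hRRN, hset_i] at h1
          omega
        rw [← List.append_cons, ← hTdecN]
        apply ih _ _ is _ (by simpa using hlen) hsort ?_ (mmPush_sorted _ _ hhs') ?_ hRdecN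
        · intro i hi
          by_cases hii : i = i₀
          · subst hii
            exact ⟨hi₀len, by rw [hset_i]; exact hc⟩
          · exact ⟨(hbound i hi).1, by rw [hset_ne i hii]; exact (hbound i hi).2⟩
        · rw [hPdecN]
          exact (mmPush_perm _ hp).trans ((hpperm.cons _).trans List.perm_middle.symm)
      · -- run i₀ is exhausted: it is dropped on both sides
        rw [if_neg hc, if_pos (by
          simp only [List.isEmpty_iff, List.drop_eq_nil_iff]
          omega)]
        have hsortLR : List.Pairwise (· < ·) (L ++ R) := by
          rw [List.pairwise_append]
          exact ⟨hPL, hPR, fun a ha b hb => hcross a ha b (List.mem_cons_of_mem _ hb)⟩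
        have hTdecN : mmTails runs (ptrs.set i₀ (ptrs.getD i₀ 0 + 1)) (L ++ R) =
            mmTails runs ptrs L ++ mmTails runs ptrs R := by
          simp only [mmTails, List.map_append]
          rw [List.map_congr_left (l := L) (fun j hj => by rw [hset_ne j (hneL j hj)]),
            List.map_congr_left (l := R) (fun j hj => by rw [hset_ne j (hneR j hj)])]
        have hPdecN : mmPairs runs (ptrs.set i₀ (ptrs.getD i₀ 0 + 1)) (L ++ R) =
            mmPairs runs ptrs L ++ mmPairs runs ptrs R := by
          simp only [mmPairs, mmVal, List.map_append]
          rw [List.map_congr_left (l := L) (fun j hj => by rw [hset_ne j (hneL j hj)]),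
            List.map_congr_left (l := R) (fun j hj => by rw [hset_ne j (hneR j hj)])]
        have hRdecN : mmRem runs (ptrs.set i₀ (ptrs.getD i₀ 0 + 1)) (L ++ R) ≤ fuel := by
          have h1 : mmRem runs (ptrs.set i₀ (ptrs.getD i₀ 0 + 1)) (L ++ R) =
              mmRem runs ptrs L + mmRem runs ptrs R := by
            simp only [mmRem, List.map_append, List.sum_append]
            rw [List.map_congr_left (l := L) (fun j hj => by rw [hset_ne j (hneL j hj)]),
              List.map_congr_left (l := R) (fun j hj => by rw [hset_ne j (hneR j hj)])]
          omega
        rw [List.append_nil, ← hTdecN]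
        apply ih _ _ (L ++ R) _ (by simpa using hlen) hsortLR ?_ hhs' ?_ hRdecN
        · intro i hi
          rcases List.mem_append.1 hi with hiL | hiE
          · exact ⟨(hbound i (hmemL i hiL)).1, by
              rw [hset_ne i (hneL i hiL)]; exact (hbound i (hmemL i hiL)).2⟩
          · exact ⟨(hbound i (hmemR i hiE)).1, by
              rw [hset_ne i (hneR i hiE)]; exact (hbound i (hmemR i hiE)).2⟩
        · rw [hPdecN]
          exact hpperm

-- initialization: the first heap and pointer array realize the invariant
lemma mmZipIdx (runs : List (List Int)) :
    runs.zipIdx = (List.range runs.length).map (fun i => (runs.getD i [], i)) := by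
  apply List.ext_getElem
  · simp
  · intro m h1 h2
    simp only [List.getElem_zipIdx, List.getElem_map, List.getElem_range]
    rw [List.getD_eq_getElem _ _ (by simpa using h1)]
    simp

lemma mmFold_if (l : List (List Int × Nat)) :
    ∀ h : List (Int × Nat),
      l.foldl (fun acc pr => if pr.1.isEmpty then acc else mmPush (pr.1.headD 0, pr.2) acc) h =
      ((l.filter (fun pr => !pr.1.isEmpty)).map (fun pr => (pr.1.headD 0, pr.2))).foldl
        (fun acc x => mmPush x acc) h := by
  induction l with
  | nil => intro h; rfl
  | cons pr l ih =>
    intro h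
    simp only [List.foldl_cons]
    by_cases hc : pr.1.isEmpty
    · rw [if_pos hc, List.filter_cons_of_neg (by simp [hc])]
      exact ih h
    · rw [if_neg hc, List.filter_cons_of_pos (by simp_all),
        List.map_cons, List.foldl_cons]
      exact ih _

lemma mmFold_push (l : List (Int × Nat)) :
    ∀ h : List (Int × Nat), List.Pairwise (fun a b => mmLexLe a b = true) h →
      List.Pairwise (fun a b => mmLexLe a b = true) (l.foldl (fun acc x => mmPush x acc) h) ∧
      (l.foldl (fun acc x => mmPush x acc) h).Perm (l ++ h) := by
  induction l with
  | nil => intro h hs; exact ⟨hs, by simp⟩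
  | cons x l ih =>
    intro h hs
    simp only [List.foldl_cons]
    obtain ⟨h1, h2⟩ := ih (mmPush x h) (mmPush_sorted x h hs)
    refine ⟨h1, h2.trans ?_⟩
    exact (List.Perm.append_left l (mmPush_perm x h)).trans List.perm_middle

lemma mmMapGetDRange (runs : List (List Int)) :
    (List.range runs.length).map (fun i => runs.getD i []) = runs := by
  apply List.ext_getElem
  · simp
  · intro m h1 h2
    simp only [List.getElem_map, List.getElem_range]
    exact List.getD_eq_getElem _ _ h2

lemma mmSumFilter (p : Nat → Bool) (f : Nat → Nat) :
    ∀ l : List Nat, (∀ x ∈ l, p x = false → f x = 0) →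
      ((l.filter p).map f).sum = (l.map f).sum := by
  intro l
  induction l with
  | nil => simp
  | cons a t ih =>
    intro h
    simp only [List.map_cons, List.sum_cons]
    by_cases hc : p a
    · rw [List.filter_cons_of_pos hc, List.map_cons, List.sum_cons,
        ih (fun x hx => h x (List.mem_cons_of_mem _ hx))]
    · simp only [Bool.not_eq_true] at hc
      rw [List.filter_cons_of_neg (by simp [hc]),
        ih (fun x hx => h x (List.mem_cons_of_mem _ hx)), h a (by simp) hc]
      omega

-- ===== VERDICT (by name: the statement is the Claim_ definition above) =====
theorem multiway_merge_spec : Claim_equal_multiway_merge := by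
  unfold Claim_equal_multiway_merge
  intro devs _
  unfold Spec_multiway_merge
  simp only [multiway_merge, multiway_merge_alt]
  have hall : devs.foldl (fun acc d => acc ++ d) [] = devs.flatMap id := by
    simpa using PySem.List.foldl_append_eq_flatMap id devs []
  rw [hall]
  set runs := devs.flatMap id with hruns
  set ptrs₀ := List.replicate runs.length 0 with hptrs₀
  set is₀ := (List.range runs.length).filter (fun i => !(runs.getD i []).isEmpty) with his₀
  have hptr₀ : ∀ i : Nat, i < runs.length → ptrs₀.getD i 0 = 0 := by
    intro i hi
    rw [hptrs₀]
    exact List.getD_replicate _ hi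
  have hmemis₀ : ∀ i ∈ is₀, i < runs.length ∧ runs.getD i [] ≠ [] := by
    intro i hi
    rw [his₀, List.mem_filter, List.mem_range] at hi
    obtain ⟨h1, h2⟩ := hi
    refine ⟨h1, fun h3 => ?_⟩
    rw [h3] at h2
    simp at h2
  have hsort₀ : List.Pairwise (· < ·) is₀ := List.pairwise_lt_range.filter _
  have hbound₀ : ∀ i ∈ is₀, i < runs.length ∧ ptrs₀.getD i 0 < (runs.getD i []).length := by
    intro i hi
    refine ⟨(hmemis₀ i hi).1, ?_⟩
    rw [hptr₀ i (hmemis₀ i hi).1]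
    exact List.length_pos_of_ne_nil (hmemis₀ i hi).2
  have hPairs₀ : mmPairs runs ptrs₀ is₀ =
      ((runs.zipIdx.filter (fun pr => !pr.1.isEmpty)).map (fun pr => (pr.1.headD 0, pr.2))) := by
    rw [mmZipIdx, List.filter_map,
      show ((fun (pr : List Int × Nat) => !pr.1.isEmpty) ∘ (fun i => (runs.getD i [], i)))
        = (fun i => !(runs.getD i []).isEmpty) from rfl, List.map_map]
    unfold mmPairs
    apply List.map_congr_left
    intro i hi
    have hilen : i < runs.length := List.mem_range.1 (List.mem_filter.1 hi).1
    show (mmVal runs ptrs₀ i, i) = ((runs.getD i []).headD 0, i)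
    unfold mmVal
    rw [hptr₀ i hilen, ← mmHeadD_drop, List.drop_zero]
  have hheap := mmFold_push (mmPairs runs ptrs₀ is₀) [] (by simp)
  rw [mmFold_if, ← hPairs₀]
  have htails : mmTails runs ptrs₀ is₀ = runs.filter (fun r => !r.isEmpty) := by
    unfold mmTails
    rw [List.map_congr_left (fun i hi => by
      rw [hptr₀ i (hmemis₀ i hi).1, List.drop_zero])]
    rw [his₀, show (fun i => !(runs.getD i []).isEmpty)
        = ((fun r => !r.isEmpty) ∘ (fun i => runs.getD i [])) from rfl,
      ← List.filter_map, mmMapGetDRange]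
  have hrem₀ : mmRem runs ptrs₀ is₀ ≤ (runs.map List.length).sum := by
    unfold mmRem
    rw [his₀, mmSumFilter (fun i => !(runs.getD i []).isEmpty)
      (fun i => (runs.getD i []).length - ptrs₀.getD i 0) (List.range runs.length)
      (fun x hx hpx => by
        simp only [Bool.not_eq_false', List.isEmpty_iff] at hpx
        simp only [hpx, List.length_nil, Nat.zero_sub])]
    rw [List.map_congr_left (f := fun i => (runs.getD i []).length - ptrs₀.getD i 0)
      (g := fun i => (runs.getD i []).length)
      (fun i hi => by
        show (runs.getD i []).length - ptrs₀.getD i 0 = (runs.getD i []).length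
        rw [hptr₀ i (List.mem_range.1 hi), Nat.sub_zero])]
    rw [show (fun i => (runs.getD i []).length) = (List.length ∘ fun i => runs.getD i []) from rfl,
      ← List.map_map, mmMapGetDRange]
  have hmain := mmMain runs ((runs.map List.length).sum)
    ((mmPairs runs ptrs₀ is₀).foldl (fun acc x => mmPush x acc) [])
    ptrs₀ is₀ [] (by rw [hptrs₀]; simp) hsort₀ hbound₀ hheap.1 (by simpa using hheap.2) hrem₀
  rw [htails] at hmain
  rw [hmain]
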